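-- pv_equiv track=rewrite | github.com/kate-roth/motif-mark-oop | motif_mark_oop.py | parse_introns_exon
-- ===== SOURCE A (Python) =====
-- def parse_introns_exon(seq):
--     '''input sequence with lowercase intron, uppercase exon, lowercase intron,
--     returns length of intron1, the exon, and intron2'''
--     i1 = 0  # intron
--     e = 0   # exon
--     i2 = 0   # intron
--     total = 0
--     for n in seq:
--         if e == 0 and n.islower():
--             i1+=1
--         elif n.isupper():
--             e+=1
--         elif i1 != 0 and e != 0 and n.islower():
--             i2+=1
--     total = i1 + e + i2
--     return (i1,e,i2, total)
-- ===== SOURCE B (Python) =====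
-- def parse_introns_exon(seq):
--     '''input sequence with lowercase intron, uppercase exon, lowercase intron,
--     returns length of intron1, the exon, and intron2'''
--     first = next((i for i, c in enumerate(seq) if c.isupper()), None)
--     if first is None:
--         i1 = sum(1 for c in seq if c.islower())
--         e = 0
--         i2 = 0
--     else:
--         i1 = sum(1 for c in seq[:first] if c.islower())
--         e = sum(1 for c in seq if c.isupper())
--         # a trailing lowercase run only counts as intron2 when an intron1 precedes the exon
--         i2 = sum(1 for c in seq[first:] if c.islower()) if i1 != 0 else 0
--     return (i1, e, i2, i1 + e + i2)
-- ===== Notes on version B (the rewrite author's own statement) =====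
-- stated objective: alternative
-- what changed: Replaces A's single three-counter state-machine loop over the sequence with a boundary decomposition: find the index of the first uppercase character, then obtain each length as a separate count over a slice (lowercase before the boundary, uppercase overall, lowercase from the boundary on).
import Mathlib
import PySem

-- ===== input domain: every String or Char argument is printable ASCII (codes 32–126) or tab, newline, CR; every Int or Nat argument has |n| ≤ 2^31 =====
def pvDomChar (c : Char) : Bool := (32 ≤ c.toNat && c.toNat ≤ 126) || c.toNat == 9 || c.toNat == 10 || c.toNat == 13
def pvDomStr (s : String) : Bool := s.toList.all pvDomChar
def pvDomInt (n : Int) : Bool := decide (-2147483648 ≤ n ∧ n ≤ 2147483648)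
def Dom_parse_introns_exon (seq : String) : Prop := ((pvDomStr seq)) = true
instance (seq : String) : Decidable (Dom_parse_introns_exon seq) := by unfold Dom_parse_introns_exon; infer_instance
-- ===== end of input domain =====

-- B replaces A's single three-counter state-machine loop with a boundary decomposition
-- (find the first uppercase character, then count each region separately); objective: alternative.

-- ===== PORT A =====
-- one step of A's for-loop over the characters, state (i1, e, i2)
def pvStepA (st : Int × Int × Int) (n : Char) : Int × Int × Int :=
  if st.2.1 == 0 && PySem.Chars.islower n then (st.1 + 1, st.2.1, st.2.2)
  else if PySem.Chars.isupper n then (st.1, st.2.1 + 1, st.2.2)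
  else if st.1 != 0 && st.2.1 != 0 && PySem.Chars.islower n then (st.1, st.2.1, st.2.2 + 1)
  else st

def parse_introns_exon (seq : String) : Int × Int × Int × Int :=
  let st := seq.toList.foldl pvStepA (0, 0, 0)
  (st.1, st.2.1, st.2.2, st.1 + st.2.1 + st.2.2)

-- ===== PORT B =====
def parse_introns_exon_alt (seq : String) : Int × Int × Int × Int :=
  let l := seq.toList
  match l.findIdx? (fun c => PySem.Chars.isupper c) with
  | none =>
      let i1 : Int := l.countP (fun c => PySem.Chars.islower c)
      (i1, 0, 0, i1)
  | some k =>
      let i1 : Int := (l.take k).countP (fun c => PySem.Chars.islower c)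
      let e : Int := l.countP (fun c => PySem.Chars.isupper c)
      let i2 : Int :=
        if i1 ≠ 0 then ((l.drop k).countP (fun c => PySem.Chars.islower c) : Int) else 0
      (i1, e, i2, i1 + e + i2)

-- ===== PRECONDITION & SPEC =====
def Spec_parse_introns_exon (seq : String) (out : Int × Int × Int × Int) : Prop := out = parse_introns_exon_alt seq
instance (seq : String) (out : Int × Int × Int × Int) : Decidable (Spec_parse_introns_exon seq out) := by unfold Spec_parse_introns_exon; infer_instance

-- ===== CLAIM (what is proved, stated in full; the proofs are below) =====
def Claim_equal_parse_introns_exon : Prop := ∀ (seq : String), Dom_parse_introns_exon seq → Spec_parse_introns_exon seq (parse_introns_exon seq)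

-- ===== LEMMAS AND PROOFS =====

theorem pv_upper_not_lower (c : Char) (h : PySem.Chars.isupper c = true) :
    PySem.Chars.islower c = false := by
  simp only [PySem.Chars.isupper, Bool.and_eq_true, decide_eq_true_eq, Char.le_def,
    UInt32.le_iff_toNat_le] at h
  simp only [PySem.Chars.islower, Bool.and_eq_false_iff, decide_eq_false_iff_not, Char.le_def,
    UInt32.le_iff_toNat_le, not_le]
  have hA : 'A'.val.toNat = 65 := by decide
  have hZ : 'Z'.val.toNat = 90 := by decide
  have ha : 'a'.val.toNat = 97 := by decide
  have hz : 'z'.val.toNat = 122 := by decide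
  omega

-- exon phase: once e > 0, the fold just counts uppercase into e and (when i1 ≠ 0) lowercase into i2
theorem pv_phaseE (r : List Char) : ∀ (i1 e i2 : Int), 0 < e →
    r.foldl pvStepA (i1, e, i2) =
      (i1, e + (r.countP (fun c => PySem.Chars.isupper c) : Int),
       i2 + if i1 ≠ 0 then (r.countP (fun c => PySem.Chars.islower c) : Int) else 0) := by
  induction r with
  | nil => intro i1 e i2 he; simp
  | cons c t ih =>
    intro i1 e i2 he
    have hne : (e == 0) = false := by simp; omega
    by_cases hu : PySem.Chars.isupper c = true
    · have hl := pv_upper_not_lower c hu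
      have hstep : pvStepA (i1, e, i2) c = (i1, e + 1, i2) := by
        simp [pvStepA, hne, hu, hl]
      rw [List.foldl_cons, hstep, ih i1 (e + 1) i2 (by omega)]
      simp only [Prod.mk.injEq]
      refine ⟨trivial, ?_, ?_⟩
      · simp only [List.countP_cons, hu, if_pos]; push_cast; ring
      · simp [hl]
    · have hu' : PySem.Chars.isupper c = false := by simpa using hu
      by_cases hl : PySem.Chars.islower c = true
      · by_cases h1 : i1 = 0
        · have hstep : pvStepA (i1, e, i2) c = (i1, e, i2) := by
            simp [pvStepA, hne, hu', hl, h1]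
          rw [List.foldl_cons, hstep, ih i1 e i2 he]
          simp [hu', h1]
        · have hstep : pvStepA (i1, e, i2) c = (i1, e, i2 + 1) := by
            simp [pvStepA, hne, hu', hl, h1]
            omega
          rw [List.foldl_cons, hstep, ih i1 e (i2 + 1) he]
          simp only [Prod.mk.injEq]
          refine ⟨trivial, ?_, ?_⟩
          · simp [hu']
          · simp only [List.countP_cons, hl, if_pos, ne_eq, h1, not_false_iff]
            push_cast; ring
      · have hl' : PySem.Chars.islower c = false := by simpa using hl
        have hstep : pvStepA (i1, e, i2) c = (i1, e, i2) := by
          simp [pvStepA, hne, hu', hl']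
        rw [List.foldl_cons, hstep, ih i1 e i2 he]
        simp [hu', hl']

-- intron1 phase: the whole fold, characterised by the position of the first uppercase character
theorem pv_phaseI (l : List Char) : ∀ (i1 : Int),
    l.foldl pvStepA (i1, 0, 0) =
      match l.findIdx? (fun c => PySem.Chars.isupper c) with
      | none => (i1 + (l.countP (fun c => PySem.Chars.islower c) : Int), 0, 0)
      | some k =>
          (i1 + ((l.take k).countP (fun c => PySem.Chars.islower c) : Int),
           (l.countP (fun c => PySem.Chars.isupper c) : Int),
           if i1 + ((l.take k).countP (fun c => PySem.Chars.islower c) : Int) ≠ 0 then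
             ((l.drop k).countP (fun c => PySem.Chars.islower c) : Int)
           else 0) := by
  induction l with
  | nil => intro i1; simp [List.findIdx?_nil]
  | cons c t ih =>
    intro i1
    by_cases hu : PySem.Chars.isupper c = true
    · have hl := pv_upper_not_lower c hu
      have hf : (c :: t).findIdx? (fun c => PySem.Chars.isupper c) = some 0 := by
        simp [List.findIdx?_cons, hu]
      simp only [hf]
      have hstep : pvStepA (i1, 0, 0) c = (i1, 1, 0) := by
        simp [pvStepA, hl, hu]
      rw [List.foldl_cons, hstep, pv_phaseE t i1 1 0 (by omega)]
      simp only [List.take_zero, List.drop_zero, List.countP_nil, Nat.cast_zero, add_zero,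
        Prod.mk.injEq]
      refine ⟨by push_cast, ?_, ?_⟩
      · simp [hu]; omega
      · simp only [List.countP_cons, hl, Bool.false_eq_true, if_neg, zero_add,
          not_false_iff]
        by_cases h1 : i1 = 0 <;> simp [h1]
    · have hu' : PySem.Chars.isupper c = false := by simpa using hu
      have hf : (c :: t).findIdx? (fun c => PySem.Chars.isupper c) =
          (t.findIdx? (fun c => PySem.Chars.isupper c)).map (· + 1) := by
        simp [List.findIdx?_cons, hu']
      by_cases hl : PySem.Chars.islower c = true
      · have hstep : pvStepA (i1, 0, 0) c = (i1 + 1, 0, 0) := by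
          simp [pvStepA, hl]
        rw [List.foldl_cons, hstep, ih (i1 + 1), hf]
        cases t.findIdx? (fun c => PySem.Chars.isupper c) with
        | none => simp [hl]; ring
        | some k =>
          simp only [Option.map_some]
          have ht : (c :: t).take (k + 1) = c :: t.take k := by simp
          have hd : (c :: t).drop (k + 1) = t.drop k := by simp
          rw [ht, hd]
          simp only [List.countP_cons, hl, hu', Prod.mk.injEq, if_pos, if_neg,
            Bool.false_eq_true, not_false_iff]
          have harith : i1 + 1 + ((t.take k).countP (fun c => PySem.Chars.islower c) : Int) =
              i1 + (((t.take k).countP (fun c => PySem.Chars.islower c) : Nat) + 1 : Int) := by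
            ring
          refine ⟨by push_cast; ring, rfl, ?_⟩
          rw [harith]
          rfl
      · have hl' : PySem.Chars.islower c = false := by simpa using hl
        have hstep : pvStepA (i1, 0, 0) c = (i1, 0, 0) := by
          simp [pvStepA, hl', hu']
        rw [List.foldl_cons, hstep, ih i1, hf]
        cases t.findIdx? (fun c => PySem.Chars.isupper c) with
        | none => simp [hl']
        | some k =>
          simp only [Option.map_some]
          have ht : (c :: t).take (k + 1) = c :: t.take k := by simp
          have hd : (c :: t).drop (k + 1) = t.drop k := by simp
          rw [ht, hd]
          simp [hl', hu']

-- ===== VERDICT (by name: the statement is the Claim_ definition above) =====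
theorem parse_introns_exon_spec : Claim_equal_parse_introns_exon := by
  intro seq _
  unfold Spec_parse_introns_exon parse_introns_exon parse_introns_exon_alt
  rw [pv_phaseI seq.toList 0]
  rcases hF : seq.toList.findIdx? (fun c => PySem.Chars.isupper c) with _ | k <;>
    simp [hF]
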